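-- pv_equiv track=rewrite | github.com/ZipengWu365/SSE-Bench | features/graph_features.py | _compute_max_depth
-- ===== SOURCE A (Python) =====
-- from collections import deque
--
-- def _compute_max_depth(nodes: set[str], adjacency: dict[str, set[str]], indegree: dict[str, int]) -> int:
--     roots = [node for node in nodes if indegree.get(node, 0) == 0]
--     if not roots:
--         roots = list(nodes)
--     max_depth = 0
--     for root in roots:
--         queue = deque([(root, 0)])
--         seen = {root}
--         while queue:
--             node, depth = queue.popleft()
--             max_depth = max(max_depth, depth)
--             for neighbour in adjacency.get(node, set()):
--                 if neighbour not in seen: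
--                     seen.add(neighbour)
--                     queue.append((neighbour, depth + 1))
--     return max_depth
-- ===== SOURCE B (Python) =====
-- def _compute_max_depth(nodes: set[str], adjacency: dict[str, set[str]], indegree: dict[str, int]) -> int:
--     roots = [node for node in nodes if indegree.get(node, 0) == 0]
--     if not roots:
--         roots = list(nodes)
--     best = 0
--     for root in roots:
--         reach = {root}
--         depth = 0
--         while True:
--             new = set(reach)
--             for node in reach:
--                 new |= adjacency.get(node, set())
--             if new == reach:
--                 break
--             reach = new
--             depth += 1
--         best = max(best, depth)
--     return best
-- ===== Notes on version B (the rewrite author's own statement) =====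
-- stated objective: simpler
-- what changed: Replaces per-root BFS with a queue, seen set and per-node depth tags by a round-based reachability closure: repeatedly expand the whole reachable set by one step and count the rounds until it saturates; that round count equals the max BFS depth (the set after k rounds is exactly the nodes within distance k).
import Mathlib
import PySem

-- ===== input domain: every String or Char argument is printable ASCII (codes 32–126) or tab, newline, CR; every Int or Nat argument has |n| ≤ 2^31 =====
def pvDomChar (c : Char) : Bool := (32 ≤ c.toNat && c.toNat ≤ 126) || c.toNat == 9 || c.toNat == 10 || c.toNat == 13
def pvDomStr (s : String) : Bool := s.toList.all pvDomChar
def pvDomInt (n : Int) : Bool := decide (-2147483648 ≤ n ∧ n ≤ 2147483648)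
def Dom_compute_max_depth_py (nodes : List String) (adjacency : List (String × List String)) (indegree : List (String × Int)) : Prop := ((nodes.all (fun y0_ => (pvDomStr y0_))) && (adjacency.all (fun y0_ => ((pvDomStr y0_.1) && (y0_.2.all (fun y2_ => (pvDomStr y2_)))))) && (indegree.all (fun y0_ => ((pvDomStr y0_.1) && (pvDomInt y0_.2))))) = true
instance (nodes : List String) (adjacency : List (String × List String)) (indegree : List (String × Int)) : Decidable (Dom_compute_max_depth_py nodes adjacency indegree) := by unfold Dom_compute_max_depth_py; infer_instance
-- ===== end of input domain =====

-- B replaces A's queue BFS (with (node, depth) entries and a seen set) by a round-based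
-- reachability closure per root that counts saturation rounds; same return value, proved equal.

-- ===== PORT A =====
-- helpers for the termination measures of A's BFS loop and B's closure loop
def pvAdjU (adj : List (String × List String)) : List String := adj.flatMap Prod.snd

def pvFree (adj : List (String × List String)) (seen : List String) : Nat :=
  ((pvAdjU adj).filter (fun x => decide (x ∉ seen))).length

theorem pv_len_filter_mono {α : Type} (l : List α) (p q : α → Bool) (h : ∀ x, q x = true → p x = true) :
    (l.filter q).length ≤ (l.filter p).length := by
  induction l with
  | nil => simp
  | cons x t ih =>
    by_cases hq : q x = true
    · simp [List.filter_cons, hq, h x hq]; omega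
    · simp only [Bool.not_eq_true] at hq
      by_cases hp : p x = true
      · simp [List.filter_cons, hq, hp]; omega
      · simp only [Bool.not_eq_true] at hp
        simp [List.filter_cons, hq, hp]; omega

theorem pv_len_filter_lt {α : Type} (l : List α) (p q : α → Bool) (h : ∀ x, q x = true → p x = true)
    (a : α) (ha : a ∈ l) (hpa : p a = true) (hqa : q a = false) :
    (l.filter q).length < (l.filter p).length := by
  induction l with
  | nil => cases ha
  | cons x t ih =>
    rcases List.mem_cons.mp ha with rfl | hat
    · have := pv_len_filter_mono t p q h
      simp [List.filter_cons, hpa, hqa]; omega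
    · have hlt := ih hat
      by_cases hq : q x = true
      · simp [List.filter_cons, hq, h x hq]; omega
      · simp only [Bool.not_eq_true] at hq
        by_cases hp : p x = true
        · simp [List.filter_cons, hq, hp]; omega
        · simp only [Bool.not_eq_true] at hp
          simp [List.filter_cons, hq, hp]; omega

theorem pvFree_append_lt (adj : List (String × List String)) (seen : List String) (x : String)
    (hx : x ∈ pvAdjU adj) (hxs : x ∉ seen) :
    pvFree adj (seen ++ [x]) < pvFree adj seen := by
  apply pv_len_filter_lt (pvAdjU adj) (fun y => decide (y ∉ seen)) (fun y => decide (y ∉ seen ++ [x])) ?hh x hx ?hp ?hq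
  case hh => intro y hy; simp only [decide_eq_true_eq, List.mem_append, List.mem_singleton] at hy ⊢; tauto
  case hp => simp [hxs]
  case hq => simp

theorem pvSet_add_eq_append (s : List String) (x : String) (hx : x ∉ s) :
    PySem.Set.add s x = s ++ [x] := by
  simp [PySem.Set.add, PySem.Set.contains]
  intro h; exact absurd h hx

theorem pv_mem_getD_adjU (adj : List (String × List String)) (node : String) (x : String)
    (hx : x ∈ PySem.Dict.getD ⟨adj⟩ node []) : x ∈ pvAdjU adj := by
  induction adj with
  | nil => simp [PySem.Dict.getD, PySem.Dict.get?] at hx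
  | cons p rest ih =>
    rw [PySem.Dict.getD_eq_get?_getD, PySem.Dict.get?_mk_cons] at hx
    by_cases h : p.1 == node
    · simp [h] at hx
      exact List.mem_flatMap.mpr ⟨p, List.mem_cons_self, hx⟩
    · simp only [Bool.not_eq_true] at h
      rw [h] at hx
      have : x ∈ pvAdjU rest := ih (by rw [PySem.Dict.getD_eq_get?_getD]; exact hx)
      simp only [pvAdjU, List.flatMap_cons]
      exact List.mem_append_right _ this

-- measure lemma for the inner neighbour folds of both loops (β = what gets appended)
theorem pvMeasFold {β : Type} (adj : List (String × List String)) (emb : String → β) :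
    ∀ (nbrs : List String) (s : List String) (q : List β),
    (∀ x ∈ nbrs, x ∈ pvAdjU adj) →
    2 * pvFree adj (nbrs.foldl (fun sq nb => if nb ∈ sq.1 then sq else (PySem.Set.add sq.1 nb, sq.2 ++ [emb nb])) (s, q)).1
      + (nbrs.foldl (fun sq nb => if nb ∈ sq.1 then sq else (PySem.Set.add sq.1 nb, sq.2 ++ [emb nb])) (s, q)).2.length
    ≤ 2 * pvFree adj s + q.length := by
  intro nbrs
  induction nbrs with
  | nil => intro s q _; simp
  | cons nb rest ih =>
    intro s q hmem
    simp only [List.foldl_cons]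
    by_cases h : nb ∈ s
    · simp only [h, if_true]
      exact ih s q (fun x hx => hmem x (List.mem_cons_of_mem _ hx))
    · simp only [h, if_false]
      have hlt := pvFree_append_lt adj s nb (hmem nb List.mem_cons_self) h
      have := ih (PySem.Set.add s nb) (q ++ [emb nb]) (fun x hx => hmem x (List.mem_cons_of_mem _ hx))
      rw [pvSet_add_eq_append s nb h] at this ⊢
      simp only [List.length_append, List.length_cons, List.length_nil] at this ⊢
      omega

def compute_max_depth_py (nodes : List String) (adjacency : List (String × List String)) (indegree : List (String × Int)) : Int :=
  let roots := nodes.filter (fun node => PySem.Dict.getD ⟨indegree⟩ node 0 == 0)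
  let roots := if roots = [] then nodes else roots
  roots.foldl (fun max_depth root => pvLoopA adjacency [(root, 0)] (PySem.Set.ofList [root]) max_depth) 0
where
  pvLoopA (adj : List (String × List String)) (queue : List (String × Int)) (seen : List String) (max_depth : Int) : Int :=
    match queue with
    | [] => max_depth
    | (node, depth) :: rest =>
      let sq := (PySem.Dict.getD ⟨adj⟩ node []).foldl
        (fun (sq : List String × List (String × Int)) nb =>
          if nb ∈ sq.1 then sq else (PySem.Set.add sq.1 nb, sq.2 ++ [(nb, depth + 1)])) (seen, rest)
      pvLoopA adj sq.2 sq.1 (max max_depth depth)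
  termination_by 2 * pvFree adj seen + queue.length
  decreasing_by
    have := pvMeasFold adj (fun nb => (nb, depth + 1)) (PySem.Dict.getD ⟨adj⟩ node []) seen rest
      (fun x hx => pv_mem_getD_adjU adj node x hx)
    exact Nat.lt_succ_of_le this

-- ===== PORT B =====
-- one closure round: new = set(reach); for node in reach: new |= adjacency.get(node, set())
def pvExpand (adj : List (String × List String)) (reach : List String) : List String :=
  reach.foldl (fun new node => PySem.Set.update new (PySem.Dict.getD ⟨adj⟩ node [])) reach

theorem pv_mem_update_of_mem (u : List String) (nbrs : List String) (x : String) (hx : x ∈ u) :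
    x ∈ PySem.Set.update u nbrs := by
  induction nbrs generalizing u with
  | nil => simpa [PySem.Set.update]
  | cons nb rest ih =>
    simp only [PySem.Set.update, List.foldl_cons] at *
    exact ih _ ((PySem.Set.mem_add u nb x).mpr (Or.inl hx))

theorem pv_mem_update_src (u : List String) (nbrs : List String) (x : String)
    (hx : x ∈ PySem.Set.update u nbrs) : x ∈ u ∨ x ∈ nbrs := by
  induction nbrs generalizing u with
  | nil => exact Or.inl hx
  | cons nb rest ih =>
    simp only [PySem.Set.update, List.foldl_cons] at hx
    rcases ih _ hx with h | h
    · rcases (PySem.Set.mem_add u nb x).mp h with h' | h'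
      · exact Or.inl h'
      · exact Or.inr (h' ▸ List.mem_cons_self)
    · exact Or.inr (List.mem_cons_of_mem _ h)

theorem pv_mem_foldupd_of_mem (adj : List (String × List String)) (l : List String)
    (u : List String) (x : String) (hx : x ∈ u) :
    x ∈ l.foldl (fun new node => PySem.Set.update new (PySem.Dict.getD ⟨adj⟩ node [])) u := by
  induction l generalizing u with
  | nil => exact hx
  | cons node rest ih =>
    exact ih _ (pv_mem_update_of_mem u _ x hx)

theorem pv_mem_foldupd_src (adj : List (String × List String)) (l : List String)
    (u : List String) (x : String)
    (hx : x ∈ l.foldl (fun new node => PySem.Set.update new (PySem.Dict.getD ⟨adj⟩ node [])) u) :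
    x ∈ u ∨ x ∈ pvAdjU adj := by
  induction l generalizing u with
  | nil => exact Or.inl hx
  | cons node rest ih =>
    rcases ih _ hx with h | h
    · rcases pv_mem_update_src u _ x h with h' | h'
      · exact Or.inl h'
      · exact Or.inr (pv_mem_getD_adjU adj node x h')
    · exact Or.inr h

theorem pvLoopC_dec (adj : List (String × List String)) (reach : List String)
    (h : ¬ PySem.Set.equal (pvExpand adj reach) reach = true) :
    pvFree adj (pvExpand adj reach) < pvFree adj reach := by
  have hsub : ∀ x ∈ reach, x ∈ pvExpand adj reach := fun x hx =>
    pv_mem_foldupd_of_mem adj reach reach x hx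
  have hx : ∃ x ∈ pvExpand adj reach, x ∉ reach := by
    by_contra hc
    push_neg at hc
    apply h
    simp only [PySem.Set.equal, PySem.Set.issubset, PySem.Set.contains, Bool.and_eq_true,
      List.all_eq_true, List.contains_iff_mem]
    exact ⟨fun x hxm => hc x hxm, fun x hxm => hsub x hxm⟩
  obtain ⟨x, hxn, hxr⟩ := hx
  have hxU : x ∈ pvAdjU adj := by
    rcases pv_mem_foldupd_src adj reach reach x hxn with h' | h'
    · exact absurd h' hxr
    · exact h'
  apply pv_len_filter_lt (pvAdjU adj) (fun y => decide (y ∉ reach))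
    (fun y => decide (y ∉ pvExpand adj reach)) ?_ x hxU (by simpa) (by simpa)
  intro y hy
  simp only [decide_eq_true_eq] at hy ⊢
  exact fun hmem => hy (hsub y hmem)

def pvLoopC (adj : List (String × List String)) (reach : List String) (depth : Int) : Int :=
  let new := pvExpand adj reach
  if PySem.Set.equal new reach then depth
  else pvLoopC adj new (depth + 1)
termination_by pvFree adj reach
decreasing_by exact pvLoopC_dec adj reach (by assumption)

def compute_max_depth_py_alt (nodes : List String) (adjacency : List (String × List String)) (indegree : List (String × Int)) : Int :=
  let roots := nodes.filter (fun node => PySem.Dict.getD ⟨indegree⟩ node 0 == 0)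
  let roots := if roots = [] then nodes else roots
  roots.foldl (fun best root => max best (pvLoopC adjacency (PySem.Set.ofList [root]) 0)) 0

-- ===== PRECONDITION & SPEC =====
def Spec_compute_max_depth_py (nodes : List String) (adjacency : List (String × List String)) (indegree : List (String × Int)) (out : Int) : Prop := out = compute_max_depth_py_alt nodes adjacency indegree
instance (nodes : List String) (adjacency : List (String × List String)) (indegree : List (String × Int)) (out : Int) : Decidable (Spec_compute_max_depth_py nodes adjacency indegree out) := by unfold Spec_compute_max_depth_py; infer_instance

-- ===== CLAIM (what is proved, stated in full; the proofs are below) =====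
def Claim_equal_compute_max_depth_py : Prop := ∀ (nodes : List String) (adjacency : List (String × List String)) (indegree : List (String × Int)), Dom_compute_max_depth_py nodes adjacency indegree → Spec_compute_max_depth_py nodes adjacency indegree (compute_max_depth_py nodes adjacency indegree)

-- ===== LEMMAS AND PROOFS =====

-- proof-side intermediate: level-synchronous BFS, linking A's flat queue to B's closure rounds
theorem pvMeasLevel (adj : List (String × List String)) :
    ∀ (fr : List String) (s : List String) (q : List String),
    2 * pvFree adj (fr.foldl (fun sn node =>
        (PySem.Dict.getD ⟨adj⟩ node []).foldl
          (fun (sn : List String × List String) nb =>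
            if nb ∈ sn.1 then sn else (PySem.Set.add sn.1 nb, sn.2 ++ [nb])) sn) (s, q)).1
      + (fr.foldl (fun sn node =>
        (PySem.Dict.getD ⟨adj⟩ node []).foldl
          (fun (sn : List String × List String) nb =>
            if nb ∈ sn.1 then sn else (PySem.Set.add sn.1 nb, sn.2 ++ [nb])) sn) (s, q)).2.length
    ≤ 2 * pvFree adj s + q.length := by
  intro fr
  induction fr with
  | nil => intro s q; simp
  | cons node rest ih =>
    intro s q
    simp only [List.foldl_cons]
    have h1 := pvMeasFold adj (fun nb => nb) (PySem.Dict.getD ⟨adj⟩ node []) s q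
      (fun x hx => pv_mem_getD_adjU adj node x hx)
    have h2 := ih (((PySem.Dict.getD ⟨adj⟩ node []).foldl
      (fun (sn : List String × List String) nb =>
        if nb ∈ sn.1 then sn else (PySem.Set.add sn.1 nb, sn.2 ++ [nb])) (s, q)).1)
      (((PySem.Dict.getD ⟨adj⟩ node []).foldl
      (fun (sn : List String × List String) nb =>
        if nb ∈ sn.1 then sn else (PySem.Set.add sn.1 nb, sn.2 ++ [nb])) (s, q)).2)
    exact le_trans h2 h1

def pvLevelB (adj : List (String × List String)) (frontier : List String) (seen : List String) (depth : Int) (max_depth : Int) : Int :=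
  if frontier = [] then max_depth
  else
    let sn := frontier.foldl (fun sn node =>
      (PySem.Dict.getD ⟨adj⟩ node []).foldl
        (fun (sn : List String × List String) nb =>
          if nb ∈ sn.1 then sn else (PySem.Set.add sn.1 nb, sn.2 ++ [nb])) sn) (seen, [])
    if sn.2 = [] then max_depth
    else pvLevelB adj sn.2 sn.1 (depth + 1) (max max_depth (depth + 1))
termination_by 2 * pvFree adj seen + frontier.length
decreasing_by
  rename_i hne _
  have hk := pvMeasLevel adj frontier seen []
  simp only [dite_eq_ite]
  rw [List.foldl_attach (l := frontier)
    (f := fun (sn : List String × List String) node =>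
      (PySem.Dict.getD ⟨adj⟩ node []).foldl
        (fun (sn : List String × List String) nb =>
          if nb ∈ sn.1 then sn else (PySem.Set.add sn.1 nb, sn.2 ++ [nb])) sn)]
  simp only [List.length_nil] at hk
  have hlen : 0 < frontier.length := List.length_pos_iff.mpr hne
  omega


-- ---- A's flat queue equals the level-synchronous BFS (pvLevelB) ----

-- inner neighbour fold: A's (with depth tags at d+1) is the level fold with the tags mapped on afterwards
theorem pv_inner (d : Int) :
    ∀ (nbrs seen nxt : List String) (cs : List (String × Int)),
    nbrs.foldl (fun sq nb => if nb ∈ sq.1 then sq else (PySem.Set.add sq.1 nb, sq.2 ++ [(nb, d + 1)]))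
        (seen, cs ++ nxt.map (fun x => (x, d + 1)))
      = ((nbrs.foldl (fun (sn : List String × List String) nb =>
            if nb ∈ sn.1 then sn else (PySem.Set.add sn.1 nb, sn.2 ++ [nb])) (seen, nxt)).1,
         cs ++ (nbrs.foldl (fun (sn : List String × List String) nb =>
            if nb ∈ sn.1 then sn else (PySem.Set.add sn.1 nb, sn.2 ++ [nb])) (seen, nxt)).2.map (fun x => (x, d + 1))) := by
  intro nbrs
  induction nbrs with
  | nil => intro seen nxt cs; simp
  | cons nb rest ih =>
    intro seen nxt cs
    simp only [List.foldl_cons]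
    by_cases h : nb ∈ seen
    · simp only [h, if_true]
      exact ih seen nxt cs
    · simp only [h, if_false]
      have := ih (PySem.Set.add seen nb) (nxt ++ [nb]) cs
      simpa [List.map_append, List.append_assoc] using this

-- peeling one whole BFS level off A's flat queue
theorem pv_peel (adj : List (String × List String)) (d : Int) :
    ∀ (cur nxt seen : List String) (m : Int),
    compute_max_depth_py.pvLoopA adj (cur.map (fun x => (x, d)) ++ nxt.map (fun x => (x, d + 1))) seen m
      = compute_max_depth_py.pvLoopA adj
          ((cur.foldl (fun sn node =>
              (PySem.Dict.getD ⟨adj⟩ node []).foldl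
                (fun (sn : List String × List String) nb =>
                  if nb ∈ sn.1 then sn else (PySem.Set.add sn.1 nb, sn.2 ++ [nb])) sn) (seen, nxt)).2.map (fun x => (x, d + 1)))
          (cur.foldl (fun sn node =>
              (PySem.Dict.getD ⟨adj⟩ node []).foldl
                (fun (sn : List String × List String) nb =>
                  if nb ∈ sn.1 then sn else (PySem.Set.add sn.1 nb, sn.2 ++ [nb])) sn) (seen, nxt)).1
          (if cur = [] then m else max m d) := by
  intro cur
  induction cur with
  | nil => intro nxt seen m; simp
  | cons c cs ih =>
    intro nxt seen m
    rw [compute_max_depth_py.pvLoopA.eq_def]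
    simp only [List.map_cons, List.cons_append]
    rw [pv_inner d (PySem.Dict.getD ⟨adj⟩ c []) seen nxt (cs.map (fun x => (x, d)))]
    rw [ih]
    simp only [List.foldl_cons]
    congr 1
    by_cases hcs : cs = [] <;> simp [hcs, max_assoc]

-- the first queue entry's depth can be max-absorbed into the running maximum
theorem pv_absorb (adj : List (String × List String)) (nd : String) (e : Int)
    (q : List (String × Int)) (seen : List String) (m : Int) :
    compute_max_depth_py.pvLoopA adj ((nd, e) :: q) seen (max m e)
      = compute_max_depth_py.pvLoopA adj ((nd, e) :: q) seen m := by
  rw [compute_max_depth_py.pvLoopA.eq_def]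
  rw [compute_max_depth_py.pvLoopA.eq_def (max_depth := m)]
  simp only [max_assoc, max_self]

-- main level-correspondence: A's flat BFS from one level equals the level-synchronous BFS
theorem pv_main (adj : List (String × List String)) :
    ∀ (n : Nat) (cur seen : List String) (d m : Int),
    2 * pvFree adj seen + cur.length ≤ n → cur ≠ [] →
    compute_max_depth_py.pvLoopA adj (cur.map (fun x => (x, d))) seen (max m d)
      = pvLevelB adj cur seen d (max m d) := by
  intro n
  induction n with
  | zero =>
    intro cur seen d m hn hne
    exact absurd hn (by have : 0 < cur.length := List.length_pos_iff.mpr hne; omega)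
  | succ n ih =>
    intro cur seen d m hn hne
    rw [pvLevelB.eq_def]
    simp only [hne, if_false]
    have hpeel := pv_peel adj d cur [] seen (max m d)
    simp only [List.map_nil, List.append_nil] at hpeel
    rw [hpeel]
    simp only [hne, if_false, max_assoc, max_self]
    have hmeas := pvMeasLevel adj cur seen []
    simp only [List.length_nil] at hmeas
    rcases hsn : (cur.foldl (fun sn node =>
        (PySem.Dict.getD ⟨adj⟩ node []).foldl
          (fun (sn : List String × List String) nb =>
            if nb ∈ sn.1 then sn else (PySem.Set.add sn.1 nb, sn.2 ++ [nb])) sn) (seen, [])) with ⟨s2, nxt⟩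
    rw [hsn] at hmeas
    simp only
    cases nxt with
    | nil => simp [compute_max_depth_py.pvLoopA]
    | cons y ys =>
      simp only [reduceCtorEq, if_false]
      have habs := pv_absorb adj y (d + 1) (ys.map (fun x => (x, d + 1))) s2 (max m d)
      have hlen : 0 < cur.length := List.length_pos_iff.mpr hne
      dsimp only at hmeas
      have hrec := ih (y :: ys) s2 (d + 1) (max m d)
        (by simp only [List.length_cons] at hmeas ⊢; omega) (by simp)
      simp only [List.map_cons] at hrec ⊢
      rw [habs] at hrec
      simpa [max_assoc] using hrec

-- ---- the level-synchronous BFS equals B's closure loop (pvLoopC) ----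

-- shape of the inner neighbour fold: it appends some fresh block e to both components,
-- and the set-only fold (Set.update) produces the same set component
theorem pv_IP_shape : ∀ (nbrs s n : List String), ∃ e,
    nbrs.foldl (fun (sn : List String × List String) nb =>
        if nb ∈ sn.1 then sn else (PySem.Set.add sn.1 nb, sn.2 ++ [nb])) (s, n) = (s ++ e, n ++ e)
    ∧ PySem.Set.update s nbrs = s ++ e
    ∧ (∀ x ∈ e, x ∉ s) ∧ (∀ x ∈ e, x ∈ nbrs) := by
  intro nbrs
  induction nbrs with
  | nil =>
    intro s n
    exact ⟨[], by simp, by simp [PySem.Set.update], by simp, by simp⟩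
  | cons nb rest ih =>
    intro s n
    by_cases h : nb ∈ s
    · obtain ⟨e, h1, h2, h3, h4⟩ := ih s n
      have hadd : PySem.Set.add s nb = s := by
        simp [PySem.Set.add, PySem.Set.contains, List.contains_iff_mem, h]
      refine ⟨e, ?_, ?_, h3, fun x hx => List.mem_cons_of_mem _ (h4 x hx)⟩
      · simpa [List.foldl_cons, h] using h1
      · simp only [PySem.Set.update, List.foldl_cons, hadd]
        simpa [PySem.Set.update] using h2
    · obtain ⟨e, h1, h2, h3, h4⟩ := ih (s ++ [nb]) (n ++ [nb])
      refine ⟨nb :: e, ?_, ?_, ?_, ?_⟩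
      · simp only [List.foldl_cons, h, if_false]
        rw [pvSet_add_eq_append s nb h, h1]
        simp
      · simp only [PySem.Set.update, List.foldl_cons]
        rw [pvSet_add_eq_append s nb h]
        simp only [PySem.Set.update] at h2
        rw [h2]
        simp
      · intro x hx
        rcases List.mem_cons.mp hx with rfl | hx'
        · exact h
        · exact fun hxs => h3 x hx' (List.mem_append_left _ hxs)
      · intro x hx
        rcases List.mem_cons.mp hx with rfl | hx'
        · exact List.mem_cons_self
        · exact List.mem_cons_of_mem _ (h4 x hx')

-- lifted to a whole frontier
theorem pv_FP_shape (adj : List (String × List String)) :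
    ∀ (fr s n : List String), ∃ e,
    fr.foldl (fun sn node => (PySem.Dict.getD ⟨adj⟩ node []).foldl
        (fun (sn : List String × List String) nb =>
          if nb ∈ sn.1 then sn else (PySem.Set.add sn.1 nb, sn.2 ++ [nb])) sn) (s, n) = (s ++ e, n ++ e)
    ∧ fr.foldl (fun new node => PySem.Set.update new (PySem.Dict.getD ⟨adj⟩ node [])) s = s ++ e
    ∧ (∀ x ∈ e, x ∉ s) ∧ (∀ x ∈ e, x ∈ pvAdjU adj) := by
  intro fr
  induction fr with
  | nil =>
    intro s n
    exact ⟨[], by simp, by simp, by simp, by simp⟩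
  | cons node rest ih =>
    intro s n
    obtain ⟨e1, i1, i2, i3, i4⟩ := pv_IP_shape (PySem.Dict.getD ⟨adj⟩ node []) s n
    obtain ⟨e2, j1, j2, j3, j4⟩ := ih (s ++ e1) (n ++ e1)
    refine ⟨e1 ++ e2, ?_, ?_, ?_, ?_⟩
    · simp only [List.foldl_cons]
      rw [i1, j1]
      simp
    · simp only [List.foldl_cons]
      rw [i2, j2]
      simp
    · intro x hx
      rcases List.mem_append.mp hx with hx' | hx'
      · exact i3 x hx'
      · exact fun hs => j3 x hx' (List.mem_append_left _ hs)
    · intro x hx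
      rcases List.mem_append.mp hx with hx' | hx'
      · exact pv_mem_getD_adjU adj node x (i4 x hx')
      · exact j4 x hx'

-- a Set.update by elements already present does nothing
theorem pv_update_skip : ∀ (nbrs u : List String), (∀ x ∈ nbrs, x ∈ u) →
    PySem.Set.update u nbrs = u := by
  intro nbrs
  induction nbrs with
  | nil => intro u _; simp [PySem.Set.update]
  | cons nb rest ih =>
    intro u hmem
    have hadd : PySem.Set.add u nb = u := by
      simp [PySem.Set.add, PySem.Set.contains, List.contains_iff_mem, hmem nb List.mem_cons_self]
    simp only [PySem.Set.update, List.foldl_cons, hadd]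
    simpa [PySem.Set.update] using ih u (fun x hx => hmem x (List.mem_cons_of_mem _ hx))

-- folding updates over nodes all of whose neighbours are already present does nothing
theorem pv_FS_skip (adj : List (String × List String)) :
    ∀ (old u : List String), (∀ x ∈ old, ∀ nb ∈ PySem.Dict.getD ⟨adj⟩ x [], nb ∈ u) →
    old.foldl (fun new node => PySem.Set.update new (PySem.Dict.getD ⟨adj⟩ node [])) u = u := by
  intro old
  induction old with
  | nil => intro u _; rfl
  | cons x rest ih =>
    intro u hmem
    simp only [List.foldl_cons]
    rw [pv_update_skip _ u (hmem x List.mem_cons_self)]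
    exact ih u (fun y hy => hmem y (List.mem_cons_of_mem _ hy))

-- Set.update contains the updated elements
theorem pv_mem_update_self : ∀ (nbrs u : List String) (x : String), x ∈ nbrs →
    x ∈ PySem.Set.update u nbrs := by
  intro nbrs
  induction nbrs with
  | nil => intro u x hx; cases hx
  | cons nb rest ih =>
    intro u x hx
    simp only [PySem.Set.update, List.foldl_cons]
    rcases List.mem_cons.mp hx with rfl | hx'
    · exact pv_mem_update_of_mem _ rest x ((PySem.Set.mem_add u x x).mpr (Or.inr rfl))
    · exact ih _ x hx'

-- every neighbour of a frontier node lands in the set produced by the frontier's update fold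
theorem pv_mem_FS_nbr (adj : List (String × List String)) :
    ∀ (fr s : List String) (x nb : String), x ∈ fr → nb ∈ PySem.Dict.getD ⟨adj⟩ x [] →
    nb ∈ fr.foldl (fun new node => PySem.Set.update new (PySem.Dict.getD ⟨adj⟩ node [])) s := by
  intro fr
  induction fr with
  | nil => intro s x nb hx; cases hx
  | cons y rest ih =>
    intro s x nb hx hnb
    simp only [List.foldl_cons]
    rcases List.mem_cons.mp hx with rfl | hx'
    · exact pv_mem_foldupd_of_mem adj rest _ nb (pv_mem_update_self _ s nb hnb)
    · exact ih _ x nb hx' hnb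

theorem pv_seteq_self (s : List String) : PySem.Set.equal s s = true := by
  simp [PySem.Set.equal, PySem.Set.issubset, PySem.Set.contains, List.all_eq_true,
    List.contains_iff_mem]

theorem pv_seteq_append_false (s e : List String) (he : e ≠ []) (h3 : ∀ x ∈ e, x ∉ s) :
    PySem.Set.equal (s ++ e) s = false := by
  cases e with
  | nil => exact absurd rfl he
  | cons y ys =>
    apply Bool.eq_false_iff.mpr
    intro ht
    simp only [PySem.Set.equal, PySem.Set.issubset, PySem.Set.contains, Bool.and_eq_true,
      List.all_eq_true, List.contains_iff_mem] at ht
    exact h3 y List.mem_cons_self (ht.1 y (List.mem_append_right _ List.mem_cons_self))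

theorem pvFree_append_lt_gen (adj : List (String × List String)) (s e : List String) (y : String)
    (hy : y ∈ e) (hyU : y ∈ pvAdjU adj) (hys : y ∉ s) :
    pvFree adj (s ++ e) < pvFree adj s := by
  apply pv_len_filter_lt (pvAdjU adj) (fun z => decide (z ∉ s)) (fun z => decide (z ∉ s ++ e))
    ?_ y hyU (by simpa) (by simp [hy])
  intro z hz
  simp only [decide_eq_true_eq, List.mem_append] at hz ⊢
  tauto

-- pvLoopC returns at least its starting depth
theorem pvLoopC_ge (adj : List (String × List String)) :
    ∀ (n : Nat) (reach : List String) (d : Int), pvFree adj reach ≤ n →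
    d ≤ pvLoopC adj reach d := by
  intro n
  induction n with
  | zero =>
    intro reach d hn
    rw [pvLoopC.eq_def]
    by_cases heq : PySem.Set.equal (pvExpand adj reach) reach = true
    · simp [heq]
    · exact absurd (pvLoopC_dec adj reach heq) (by omega)
  | succ n ih =>
    intro reach d hn
    rw [pvLoopC.eq_def]
    by_cases heq : PySem.Set.equal (pvExpand adj reach) reach = true
    · simp [heq]
    · have hlt := pvLoopC_dec adj reach heq
      simp only [heq, if_false]
      have := ih (pvExpand adj reach) (d + 1) (by omega)
      omega

-- lockstep: the level BFS on (frontier, seen) equals closure rounds on seen, under the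
-- invariant that seen = old ++ frontier and all earlier nodes' neighbours are already in seen
theorem pv_lock (adj : List (String × List String)) :
    ∀ (n : Nat) (old fr : List String) (d m : Int),
    fr ≠ [] → d ≤ m →
    (∀ x ∈ old, ∀ nb ∈ PySem.Dict.getD ⟨adj⟩ x [], nb ∈ old ++ fr) →
    pvFree adj (old ++ fr) ≤ n →
    pvLevelB adj fr (old ++ fr) d m = max m (pvLoopC adj (old ++ fr) d) := by
  intro n
  induction n with
  | zero =>
    intro old fr d m hfr hdm hinv hn
    obtain ⟨e, h1, h2, h3, h4⟩ := pv_FP_shape adj fr (old ++ fr) []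
    have hexp : pvExpand adj (old ++ fr) = (old ++ fr) ++ e := by
      unfold pvExpand
      rw [List.foldl_append, pv_FS_skip adj old (old ++ fr) hinv]
      exact h2
    cases he : e with
    | cons y ys =>
      exact absurd (pvFree_append_lt_gen adj (old ++ fr) e y (he ▸ List.mem_cons_self)
        (h4 y (he ▸ List.mem_cons_self)) (h3 y (he ▸ List.mem_cons_self))) (by omega)
    | nil =>
      subst he
      rw [pvLevelB.eq_def]
      simp only [hfr, if_false, h1, List.nil_append, if_true]
      rw [pvLoopC.eq_def]
      simp only [hexp, List.append_nil, pv_seteq_self, if_true]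
      exact (max_eq_left hdm).symm
  | succ n ih =>
    intro old fr d m hfr hdm hinv hn
    obtain ⟨e, h1, h2, h3, h4⟩ := pv_FP_shape adj fr (old ++ fr) []
    have hexp : pvExpand adj (old ++ fr) = (old ++ fr) ++ e := by
      unfold pvExpand
      rw [List.foldl_append, pv_FS_skip adj old (old ++ fr) hinv]
      exact h2
    rw [pvLevelB.eq_def]
    simp only [hfr, if_false, h1, List.nil_append]
    rw [pvLoopC.eq_def]
    simp only [hexp]
    cases he : e with
    | nil =>
      subst he
      simp only [List.append_nil, pv_seteq_self, if_true]
      exact (max_eq_left hdm).symm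
    | cons y ys =>
      subst he
      have hy : y ∈ y :: ys := List.mem_cons_self
      have hfree : pvFree adj ((old ++ fr) ++ (y :: ys)) < pvFree adj (old ++ fr) :=
        pvFree_append_lt_gen adj (old ++ fr) (y :: ys) y hy (h4 y hy) (h3 y hy)
      have hseq := pv_seteq_append_false (old ++ fr) (y :: ys) (by simp) h3
      simp only [hseq, reduceCtorEq, if_false]
      have hinv' : ∀ x ∈ old ++ fr, ∀ nb ∈ PySem.Dict.getD ⟨adj⟩ x [],
          nb ∈ (old ++ fr) ++ (y :: ys) := by
        intro x hx nb hnb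
        rcases List.mem_append.mp hx with hx' | hx'
        · exact List.mem_append_left _ (hinv x hx' nb hnb)
        · rw [← h2]
          exact pv_mem_FS_nbr adj fr (old ++ fr) x nb hx' hnb
      have hrec := ih (old ++ fr) (y :: ys) (d + 1) (max m (d + 1)) (by simp)
        (le_max_right m (d + 1)) hinv' (by omega)
      rw [hrec]
      have hge : d + 1 ≤ pvLoopC adj ((old ++ fr) ++ (y :: ys)) (d + 1) :=
        pvLoopC_ge adj (pvFree adj ((old ++ fr) ++ (y :: ys))) _ _ le_rfl
      rw [max_assoc, max_eq_right hge]

theorem pv_ofList_single (r : String) : PySem.Set.ofList [r] = [r] := by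
  simp [PySem.Set.ofList, PySem.Set.empty, PySem.Set.add, PySem.Set.contains]

-- the outer fold over the roots, with the invariant 0 ≤ running maximum
theorem pv_outer (adj : List (String × List String)) :
    ∀ (roots : List String) (m : Int), 0 ≤ m →
    roots.foldl (fun max_depth root =>
        compute_max_depth_py.pvLoopA adj [(root, 0)] (PySem.Set.ofList [root]) max_depth) m
      = roots.foldl (fun best root =>
        max best (pvLoopC adj (PySem.Set.ofList [root]) 0)) m := by
  intro roots
  induction roots with
  | nil => intro m _; rfl
  | cons r rs ih =>
    intro m hm
    simp only [List.foldl_cons, pv_ofList_single]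
    have hlevel : compute_max_depth_py.pvLoopA adj [(r, 0)] [r] m = pvLevelB adj [r] [r] 0 m := by
      have := pv_main adj (2 * pvFree adj [r] + 1) [r] [r] 0 m (by simp) (by simp)
      simpa [max_eq_left hm] using this
    have hlock : pvLevelB adj [r] [r] 0 m = max m (pvLoopC adj [r] 0) := by
      have := pv_lock adj (pvFree adj [r]) [] [r] 0 m (by simp) hm (by simp) (by simp)
      simpa using this
    rw [hlevel, hlock]
    exact ih _ (le_trans hm (le_max_left _ _))

-- ===== VERDICT (by name: the statement is the Claim_ definition above) =====
theorem compute_max_depth_py_spec : Claim_equal_compute_max_depth_py := by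
  intro nodes adjacency indegree _
  unfold Spec_compute_max_depth_py compute_max_depth_py compute_max_depth_py_alt
  exact pv_outer adjacency _ 0 le_rfl
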